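-- pv_equiv track=rewrite | github.com/XColorful/Task | package/account/function.py | detect_char_list
-- ===== SOURCE A (Python) =====
-- uppercase = "ABCDEFGHIJKLMNOPQRSTUVWXYZ"
--
-- lowercase = "abcdefghijklmnopqrstuvwxyz"
--
-- symbols = "!\"#$%&'()*+,-./:;<=>?@[\\]^_`{|}~"
--
-- numbers = "0123456789"
--
-- def detect_char_list(password):
--     char_list = []
--     if password == "": return char_list
--
--     has_uppercase = False
--     has_lowercase = False
--     has_symbols = False
--     has_numbers = False
--
--     for char in password:
--
--         if has_uppercase != True:
--             if char in uppercase: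
--                 char_list.append(uppercase)
--                 has_uppercase = True
--                 continue
--
--         if has_lowercase != True:
--             if char in lowercase:
--                 char_list.append(lowercase)
--                 has_lowercase = True
--                 continue
--
--         if has_symbols != True:
--             if char in symbols:
--                 char_list.append(symbols)
--                 has_symbols = True
--                 continue
--
--         if has_numbers != True:
--             if char in numbers:
--                 char_list.append(numbers)
--                 has_numbers = True
--                 continue
--
--         if has_uppercase and has_lowercase and has_symbols and has_numbers:
--             break
--
--     return char_list
-- ===== SOURCE B (Python) =====
-- uppercase = "ABCDEFGHIJKLMNOPQRSTUVWXYZ"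
--
-- lowercase = "abcdefghijklmnopqrstuvwxyz"
--
-- symbols = "!\"#$%&'()*+,-./:;<=>?@[\\]^_`{|}~"
--
-- numbers = "0123456789"
--
-- def detect_char_list(password):
--     # staged: one scan per class for its first-occurrence position, then sort
--     pairs = []
--     for cls in (uppercase, lowercase, symbols, numbers):
--         for i, ch in enumerate(password):
--             if ch in cls:
--                 pairs.append((i, cls))
--                 break
--     pairs.sort(key=lambda p: p[0])
--     return [cls for _, cls in pairs]
-- ===== Notes on version B (the rewrite author's own statement) =====
-- stated objective: alternative
-- what changed: Instead of one pass over the password with four booleans and an if/continue cascade, B scans the password once per class to record each class's first-occurrence index, sorts the found (index, class) pairs by index, and returns the class strings in that order.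
import Mathlib
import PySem

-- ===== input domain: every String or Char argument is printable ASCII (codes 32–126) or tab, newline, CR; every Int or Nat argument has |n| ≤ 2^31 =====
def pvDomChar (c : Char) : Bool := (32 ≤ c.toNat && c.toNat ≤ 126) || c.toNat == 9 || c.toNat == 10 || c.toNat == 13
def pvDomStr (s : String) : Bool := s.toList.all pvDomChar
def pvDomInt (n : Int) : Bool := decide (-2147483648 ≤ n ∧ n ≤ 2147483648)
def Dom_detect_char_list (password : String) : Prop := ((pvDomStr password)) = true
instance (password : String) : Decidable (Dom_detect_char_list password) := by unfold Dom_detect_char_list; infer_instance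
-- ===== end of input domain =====

-- B replaces A's single flagged pass with staged per-class scans for each class's
-- first-occurrence index, then a sort of the (index, class) pairs (objective: alternative).


def pvUppercase : String := "ABCDEFGHIJKLMNOPQRSTUVWXYZ"
def pvLowercase : String := "abcdefghijklmnopqrstuvwxyz"
def pvSymbols : String := "!\"#$%&'()*+,-./:;<=>?@[\\]^_`{|}~"
def pvNumbers : String := "0123456789"

-- ===== PORT A =====
-- state: remaining chars, char_list, has_uppercase, has_lowercase, has_symbols, has_numbers
def pvAGo : List Char → List String → Bool → Bool → Bool → Bool → List String
  | [], cl, _, _, _, _ => cl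
  | c :: rest, cl, bu, bl, bs, bn =>
    if bu = false ∧ c ∈ pvUppercase.toList then pvAGo rest (cl ++ [pvUppercase]) true bl bs bn
    else if bl = false ∧ c ∈ pvLowercase.toList then pvAGo rest (cl ++ [pvLowercase]) bu true bs bn
    else if bs = false ∧ c ∈ pvSymbols.toList then pvAGo rest (cl ++ [pvSymbols]) bu bl true bn
    else if bn = false ∧ c ∈ pvNumbers.toList then pvAGo rest (cl ++ [pvNumbers]) bu bl bs true
    else if bu ∧ bl ∧ bs ∧ bn then cl  -- break
    else pvAGo rest cl bu bl bs bn

def detect_char_list (password : String) : List String :=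
  if password = "" then []
  else pvAGo password.toList [] false false false false

-- ===== PORT B =====
-- inner loop: 'for i, ch in enumerate(password): if ch in cls: … break'
-- returns the index of the first character of chars belonging to cls (i = running index)
def pvFirstIdxGo (cls : String) : List Char → Nat → Option Nat
  | [], _ => none
  | c :: rest, i => if c ∈ cls.toList then some i else pvFirstIdxGo cls rest (i + 1)

-- outer loop over the four class strings, appending (first index, cls) when found
def pvPairs (chars : List Char) : List (Nat × String) :=
  [pvUppercase, pvLowercase, pvSymbols, pvNumbers].foldl
    (fun acc cls =>
      match pvFirstIdxGo cls chars 0 with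
      | some i => acc ++ [(i, cls)]
      | none => acc) []

-- pairs.sort(key=lambda p: p[0]); return [cls for _, cls in pairs]
def detect_char_list_alt (password : String) : List String :=
  (PySem.List.sorted (pvPairs password.toList) (fun p => p.1) false).map (fun p => p.2)

-- ===== PRECONDITION & SPEC =====
def Spec_detect_char_list (password : String) (out : List String) : Prop := out = detect_char_list_alt password
instance (password : String) (out : List String) : Decidable (Spec_detect_char_list password out) := by unfold Spec_detect_char_list; infer_instance

-- ===== CLAIM (what is proved, stated in full; the proofs are below) =====
def Claim_equal_detect_char_list : Prop := ∀ (password : String), Dom_detect_char_list password → Spec_detect_char_list password (detect_char_list password)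

-- ===== LEMMAS AND PROOFS =====

def pvClasses : List String := [pvUppercase, pvLowercase, pvSymbols, pvNumbers]

-- the unique candidate class (among cands) containing c
def pvFindCls (c : Char) : List String → Option String
  | [] => none
  | s :: rest => if c ∈ s.toList then some s else pvFindCls c rest

-- canonical middle form: classes in order of first occurrence, annotated with indices
def pvCollect : List Char → List String → Nat → List (Nat × String)
  | [], _, _ => []
  | c :: rest, cands, i =>
    match pvFindCls c cands with
    | some s => (i, s) :: pvCollect rest (cands.erase s) (i + 1)
    | none => pvCollect rest cands (i + 1)

def pvCands (bu bl bs bn : Bool) : List String :=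
  (if bu then [] else [pvUppercase]) ++ (if bl then [] else [pvLowercase]) ++
  (if bs then [] else [pvSymbols]) ++ (if bn then [] else [pvNumbers])

lemma pvDisjAux (s t : String) (h : (s.toList.all (fun c => !(t.toList.contains c))) = true) :
    ∀ c ∈ s.toList, c ∉ t.toList := by
  intro c hc
  simpa using List.all_eq_true.mp h c hc

lemma pvDisjU : ∀ c ∈ pvUppercase.toList,
    c ∉ pvLowercase.toList ∧ c ∉ pvSymbols.toList ∧ c ∉ pvNumbers.toList := by
  intro c hc
  exact ⟨pvDisjAux _ _ rfl c hc, pvDisjAux _ _ rfl c hc, pvDisjAux _ _ rfl c hc⟩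

lemma pvDisjL : ∀ c ∈ pvLowercase.toList,
    c ∉ pvUppercase.toList ∧ c ∉ pvSymbols.toList ∧ c ∉ pvNumbers.toList := by
  intro c hc
  exact ⟨pvDisjAux _ _ rfl c hc, pvDisjAux _ _ rfl c hc, pvDisjAux _ _ rfl c hc⟩

lemma pvDisjS : ∀ c ∈ pvSymbols.toList,
    c ∉ pvUppercase.toList ∧ c ∉ pvLowercase.toList ∧ c ∉ pvNumbers.toList := by
  intro c hc
  exact ⟨pvDisjAux _ _ rfl c hc, pvDisjAux _ _ rfl c hc, pvDisjAux _ _ rfl c hc⟩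

lemma pvDisjN : ∀ c ∈ pvNumbers.toList,
    c ∉ pvUppercase.toList ∧ c ∉ pvLowercase.toList ∧ c ∉ pvSymbols.toList := by
  intro c hc
  exact ⟨pvDisjAux _ _ rfl c hc, pvDisjAux _ _ rfl c hc, pvDisjAux _ _ rfl c hc⟩

lemma pvCollect_nil_cands (chars : List Char) (i : Nat) : pvCollect chars [] i = [] := by
  induction chars generalizing i with
  | nil => rfl
  | cons c rest ih => simp [pvCollect, pvFindCls, ih]

lemma pvCollect_snd_irrel : ∀ (chars : List Char) (cands : List String) (i j : Nat),
    (pvCollect chars cands i).map Prod.snd = (pvCollect chars cands j).map Prod.snd := by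
  intro chars
  induction chars with
  | nil => intro cands i j; rfl
  | cons c rest ih =>
    intro cands i j
    cases h : pvFindCls c cands <;> simp [pvCollect, h] <;> apply ih

lemma pvCollect_snd_one (chars : List Char) (cands : List String) :
    (pvCollect chars cands 1).map Prod.snd = (pvCollect chars cands 0).map Prod.snd :=
  pvCollect_snd_irrel chars cands 1 0

lemma pvBeq1 : (pvUppercase == pvLowercase) = false := by decide

lemma pvBeq2 : (pvUppercase == pvSymbols) = false := by decide

lemma pvBeq3 : (pvUppercase == pvNumbers) = false := by decide

lemma pvBeq5 : (pvLowercase == pvSymbols) = false := by decide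

lemma pvBeq6 : (pvLowercase == pvNumbers) = false := by decide

lemma pvBeq9 : (pvSymbols == pvNumbers) = false := by decide

-- A equals the canonical collect (invariant: flags ↔ candidate classes still open)
lemma pvA_collect : ∀ (chars : List Char) (cl : List String) (bu bl bs bn : Bool),
    pvAGo chars cl bu bl bs bn = cl ++ (pvCollect chars (pvCands bu bl bs bn) 0).map Prod.snd := by
  intro chars
  induction chars with
  | nil => intro cl bu bl bs bn; simp [pvAGo, pvCollect]
  | cons c rest ih =>
    intro cl bu bl bs bn
    by_cases hu : c ∈ pvUppercase.toList
    · obtain ⟨d1, d2, d3⟩ := pvDisjU c hu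
      cases bu <;> cases bl <;> cases bs <;> cases bn <;>
        simp [pvAGo, pvCollect, pvCands, pvFindCls, hu, d1, d2, d3, ih,
          pvCollect_snd_one, pvCollect_nil_cands]
    · by_cases hl : c ∈ pvLowercase.toList
      · obtain ⟨d1, d2, d3⟩ := pvDisjL c hl
        cases bu <;> cases bl <;> cases bs <;> cases bn <;>
          simp [pvAGo, pvCollect, pvCands, pvFindCls, hl, d1, d2, d3, ih,
            pvCollect_snd_one, pvCollect_nil_cands, pvBeq1]
      · by_cases hs : c ∈ pvSymbols.toList
        · obtain ⟨d1, d2, d3⟩ := pvDisjS c hs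
          cases bu <;> cases bl <;> cases bs <;> cases bn <;>
            simp [pvAGo, pvCollect, pvCands, pvFindCls, hs, d1, d2, d3, ih,
              pvCollect_snd_one, pvCollect_nil_cands, pvBeq2, pvBeq5]
        · by_cases hn : c ∈ pvNumbers.toList
          · obtain ⟨d1, d2, d3⟩ := pvDisjN c hn
            cases bu <;> cases bl <;> cases bs <;> cases bn <;>
              simp [pvAGo, pvCollect, pvCands, pvFindCls, hn, d1, d2, d3, ih,
                pvCollect_snd_one, pvCollect_nil_cands, pvBeq3, pvBeq6, pvBeq9]
          · cases bu <;> cases bl <;> cases bs <;> cases bn <;>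
              simp [pvAGo, pvCollect, pvCands, pvFindCls, hu, hl, hs, hn, ih,
                pvCollect_snd_one, pvCollect_nil_cands]

-- ===== B-side lemmas =====

lemma pvFindCls_none (c : Char) : ∀ (cands : List String), pvFindCls c cands = none →
    ∀ s ∈ cands, c ∉ s.toList := by
  intro cands
  induction cands with
  | nil => simp
  | cons t rest ih =>
    intro h s hs
    by_cases hct : c ∈ t.toList
    · simp [pvFindCls, hct] at h
    · rw [pvFindCls, if_neg hct] at h
      rcases List.mem_cons.mp hs with rfl | hs
      · exact hct
      · exact ih h s hs

lemma pvFindCls_some (c : Char) : ∀ (cands : List String) (s : String),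
    pvFindCls c cands = some s → s ∈ cands ∧ c ∈ s.toList := by
  intro cands
  induction cands with
  | nil => simp [pvFindCls]
  | cons t rest ih =>
    intro s h
    by_cases hct : c ∈ t.toList
    · simp [pvFindCls, hct] at h
      exact ⟨by simp [h], h ▸ hct⟩
    · simp [pvFindCls, hct] at h
      obtain ⟨h1, h2⟩ := ih s h
      exact ⟨List.mem_cons_of_mem _ h1, h2⟩

-- a char in one class is in no other class
lemma pvDisjoint {s t : String} {c : Char} (hs : s ∈ pvClasses) (ht : t ∈ pvClasses)
    (hne : t ≠ s) (hc : c ∈ s.toList) : c ∉ t.toList := by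
  simp [pvClasses] at hs ht
  rcases hs with rfl | rfl | rfl | rfl
  · obtain ⟨a, b, d⟩ := pvDisjU c hc
    rcases ht with rfl | rfl | rfl | rfl
    · exact absurd rfl hne
    · exact a
    · exact b
    · exact d
  · obtain ⟨a, b, d⟩ := pvDisjL c hc
    rcases ht with rfl | rfl | rfl | rfl
    · exact a
    · exact absurd rfl hne
    · exact b
    · exact d
  · obtain ⟨a, b, d⟩ := pvDisjS c hc
    rcases ht with rfl | rfl | rfl | rfl
    · exact a
    · exact b
    · exact absurd rfl hne
    · exact d
  · obtain ⟨a, b, d⟩ := pvDisjN c hc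
    rcases ht with rfl | rfl | rfl | rfl
    · exact a
    · exact b
    · exact d
    · exact absurd rfl hne

-- the collected pairs are, as a multiset, exactly the per-class first-occurrence pairs
lemma pvCollect_perm : ∀ (chars : List Char) (cands : List String), cands.Nodup →
    cands ⊆ pvClasses → ∀ (i : Nat),
    (pvCollect chars cands i).Perm
      (cands.filterMap (fun s => (pvFirstIdxGo s chars i).map (fun j => (j, s)))) := by
  intro chars
  induction chars with
  | nil =>
    intro cands _ _ i
    simp [pvCollect, pvFirstIdxGo]
  | cons c rest ih =>
    intro cands hnd hsub i
    cases hf : pvFindCls c cands with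
    | none =>
      have hnone := pvFindCls_none c cands hf
      have hcong : cands.filterMap (fun s => (pvFirstIdxGo s (c :: rest) i).map (fun j => (j, s)))
          = cands.filterMap (fun s => (pvFirstIdxGo s rest (i + 1)).map (fun j => (j, s))) := by
        apply List.filterMap_congr
        intro s hs
        simp [pvFirstIdxGo, hnone s hs]
      rw [hcong]
      simpa [pvCollect, hf] using ih cands hnd hsub (i + 1)
    | some s =>
      obtain ⟨hmem, hc⟩ := pvFindCls_some c cands s hf
      have hperm0 : cands.Perm (s :: cands.erase s) := List.perm_cons_erase hmem
      have hstep : (cands.erase s).filterMap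
            (fun t => (pvFirstIdxGo t (c :: rest) i).map (fun j => (j, t)))
          = (cands.erase s).filterMap
            (fun t => (pvFirstIdxGo t rest (i + 1)).map (fun j => (j, t))) := by
        apply List.filterMap_congr
        intro t ht
        have htne : t ≠ s := by
          intro h
          exact (List.Nodup.not_mem_erase hnd) (h ▸ ht)
        have : c ∉ t.toList :=
          pvDisjoint (hsub hmem) (hsub (List.mem_of_mem_erase ht)) htne hc
        simp [pvFirstIdxGo, this]
      have hrec := ih (cands.erase s) (hnd.erase s) (fun t ht => hsub (List.mem_of_mem_erase ht)) (i + 1)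
      have h1 : pvCollect (c :: rest) cands i
          = (i, s) :: pvCollect rest (cands.erase s) (i + 1) := by simp [pvCollect, hf]
      have h2 : ((i, s) :: pvCollect rest (cands.erase s) (i + 1)).Perm
          ((i, s) :: (cands.erase s).filterMap
            (fun t => (pvFirstIdxGo t rest (i + 1)).map (fun j => (j, t)))) := hrec.cons _
      have h3 : (i, s) :: (cands.erase s).filterMap
            (fun t => (pvFirstIdxGo t rest (i + 1)).map (fun j => (j, t)))
          = (s :: cands.erase s).filterMap
            (fun t => (pvFirstIdxGo t (c :: rest) i).map (fun j => (j, t))) := by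
        have hhead : pvFirstIdxGo s (c :: rest) i = some i := by
          rw [pvFirstIdxGo, if_pos hc]
        simp only [List.filterMap_cons, hhead, Option.map_some]
        rw [hstep]
      have h4 : ((s :: cands.erase s).filterMap
            (fun t => (pvFirstIdxGo t (c :: rest) i).map (fun j => (j, t)))).Perm
          (cands.filterMap
            (fun t => (pvFirstIdxGo t (c :: rest) i).map (fun j => (j, t)))) :=
        (hperm0.filterMap _).symm
      rw [h1]
      exact h2.trans (by rw [h3]; exact h4)

-- every collected index is at least the running index
lemma pvCollect_ge : ∀ (chars : List Char) (cands : List String) (i : Nat),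
    ∀ p ∈ pvCollect chars cands i, i ≤ p.1 := by
  intro chars
  induction chars with
  | nil => intro cands i p hp; simp [pvCollect] at hp
  | cons c rest ih =>
    intro cands i p hp
    cases hf : pvFindCls c cands with
    | none =>
      rw [pvCollect, hf] at hp
      exact Nat.le_of_succ_le (ih cands (i + 1) p hp)
    | some s =>
      rw [pvCollect, hf] at hp
      rcases List.mem_cons.mp hp with rfl | hp
      · exact Nat.le_refl i
      · exact Nat.le_of_succ_le (ih (cands.erase s) (i + 1) p hp)

-- collected pairs are strictly increasing in the index
lemma pvCollect_pairwise : ∀ (chars : List Char) (cands : List String) (i : Nat),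
    (pvCollect chars cands i).Pairwise (fun a b => a.1 < b.1) := by
  intro chars
  induction chars with
  | nil => intro cands i; simp [pvCollect]
  | cons c rest ih =>
    intro cands i
    cases hf : pvFindCls c cands with
    | none => rw [pvCollect, hf]; exact ih cands (i + 1)
    | some s =>
      rw [pvCollect, hf]
      exact List.Pairwise.cons
        (fun p hp => Nat.lt_of_succ_le (pvCollect_ge rest (cands.erase s) (i + 1) p hp))
        (ih (cands.erase s) (i + 1))

-- the B-side foldl over the four classes is the filterMap over pvClasses
lemma pvPairs_eq (chars : List Char) :
    pvPairs chars = pvClasses.filterMap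
      (fun s => (pvFirstIdxGo s chars 0).map (fun j => (j, s))) := by
  cases h1 : pvFirstIdxGo pvUppercase chars 0 <;>
    cases h2 : pvFirstIdxGo pvLowercase chars 0 <;>
      cases h3 : pvFirstIdxGo pvSymbols chars 0 <;>
        cases h4 : pvFirstIdxGo pvNumbers chars 0 <;>
          simp [pvPairs, pvClasses, h1, h2, h3, h4]

-- B equals the canonical collect
lemma pvB_collect (chars : List Char) :
    (PySem.List.sorted (pvPairs chars) (fun p => p.1) false).map (fun p => p.2)
      = (pvCollect chars pvClasses 0).map Prod.snd := by
  have hperm : (pvCollect chars pvClasses 0).Perm (pvPairs chars) := by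
    rw [pvPairs_eq]
    exact pvCollect_perm chars pvClasses (by decide) (fun s hs => hs) 0
  have hsorted := PySem.List.sorted_eq_of_perm_of_pairwise_lt (pvPairs chars)
    (pvCollect chars pvClasses 0) (fun p => p.1) hperm (pvCollect_pairwise chars pvClasses 0)
  rw [hsorted]

-- ===== VERDICT (by name: the statement is the Claim_ definition above) =====
theorem detect_char_list_spec : Claim_equal_detect_char_list := by
  intro password _
  unfold Spec_detect_char_list detect_char_list detect_char_list_alt
  by_cases h : password = ""
  · subst h; rfl
  · rw [if_neg h, pvB_collect]
    simpa [pvCands, pvClasses] using pvA_collect password.toList [] false false false false
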